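-- pv_equiv track=rewrite | github.com/Viktor-Bubanja/Pretty-Good-Diff | src/diff.py | _find_best_solution
-- ===== SOURCE A (Python) =====
-- def _find_best_solution(matrix):
--     """
--     The 'best' solution is the one that maps the highest number of characters together
--     between the two strings. Equally good solutions are prioritised by how 'grouped together'
--     the mappings are. A further description is given in the docstring of _calculate_separatedness.
--     """
--     max_value = 0
--     separateness_of_best_solution = float("inf")
--     max_index = 0, 0
--
--     for i in range(len(matrix)):
--         for j in range(len(matrix[i])):
--             if len(matrix[i][j]) >= max_value:
--                 separateness = _calculate_separatedness(matrix[i][j])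
--                 if len(matrix[i][j]) == max_value:
--                     if separateness >= separateness_of_best_solution:
--                         continue
--                 max_value = len(matrix[i][j])
--                 max_index = (i, j)
--                 separateness_of_best_solution = separateness
--
--     return matrix[max_index[0]][max_index[1]]
--
-- def _calculate_separatedness(mapped_indexes):
--     """
--     We want to prioritise pairing up indexes so that substrings are grouped together
--     as much as possible. For example, if we have the following two strings:
--     first_str: AXBXCXABC
--     second_str: ABCXXXXX
--     We want to map the "ABC" from the end of the first string to the "ABC" in the second string
--     instead of mapping each of the letters "A", "B", and "C" individually.
--     We therefore have this function to calculate the level of 'separatedness' of a mapping.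
--     """
--     if not mapped_indexes:
--         return 0
--     first_str_indexes, second_str_indexes = zip(*mapped_indexes)
--     return sum(
--         first_str_indexes[i + 1] - first_str_indexes[i]
--         for i in range(len(first_str_indexes) - 1)
--     ) + sum(
--         second_str_indexes[i + 1] - second_str_indexes[i]
--         for i in range(len(second_str_indexes) - 1)
--     )
-- ===== SOURCE B (Python) =====
-- def _find_best_solution(matrix):
--     # Telescoping: sum of consecutive index differences = last index - first index,
--     # so each cell's separatedness is computed in O(1) from its first and last pair.
--     best_key = None
--     best = None
--     for row in matrix:
--         for cell in row:
--             if cell: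
--                 sep = (cell[-1][0] - cell[0][0]) + (cell[-1][1] - cell[0][1])
--             else:
--                 sep = 0
--             key = (-len(cell), sep)
--             if best_key is None or key < best_key:
--                 best_key = key
--                 best = cell
--     return best
-- ===== Notes on version B (the rewrite author's own statement) =====
-- stated objective: faster
-- what changed: B replaces the per-cell O(k) sum of consecutive index differences by the telescoped closed form (last index - first index per coordinate) and keeps the running best cell with a lexicographic (-count, separatedness) key instead of re-indexing the matrix.
-- outside the precondition, e.g. on _find_best_solution([[], []]): A raises IndexError, B returns None
import Mathlib
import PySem

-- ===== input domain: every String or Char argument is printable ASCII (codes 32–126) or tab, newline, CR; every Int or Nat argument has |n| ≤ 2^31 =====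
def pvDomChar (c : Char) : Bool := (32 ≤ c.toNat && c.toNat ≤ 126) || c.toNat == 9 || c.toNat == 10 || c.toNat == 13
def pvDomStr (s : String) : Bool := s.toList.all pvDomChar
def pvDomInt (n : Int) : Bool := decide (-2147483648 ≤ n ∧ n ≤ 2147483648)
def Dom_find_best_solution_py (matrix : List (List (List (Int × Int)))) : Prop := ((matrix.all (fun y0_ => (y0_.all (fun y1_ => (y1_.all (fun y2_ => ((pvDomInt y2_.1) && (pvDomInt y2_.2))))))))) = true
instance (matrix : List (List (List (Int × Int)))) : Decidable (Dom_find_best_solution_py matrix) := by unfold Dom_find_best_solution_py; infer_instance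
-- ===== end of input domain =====

-- B replaces A's per-cell O(k) separatedness sums by the telescoped closed form
-- (last - first for each coordinate) and keeps a single running best cell instead of
-- an index pair, making the scan O(1) per cell.

-- ===== PORT A =====

-- sum(xs[i+1] - xs[i] for i in range(len(xs)-1)): the consecutive differences, in order
def pvSepSum (xs : List Int) : Int :=
  ((xs.zip xs.tail).map (fun p => p.2 - p.1)).sum

-- _calculate_separatedness
def pvCalcSep (m : List (Int × Int)) : Int :=
  match m with
  | [] => 0
  | _ => pvSepSum (m.map Prod.fst) + pvSepSum (m.map Prod.snd)

-- one iteration of A's inner loop body; sepBest : Option Int with none = float("inf")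
def pvStepA (st : Int × Option Int × Int × Int) (i j : Int) (cell : List (Int × Int)) :
    Int × Option Int × Int × Int :=
  let (maxv, sepBest, idx) := st
  if (cell.length : Int) ≥ maxv then
    let sep := pvCalcSep cell
    match sepBest with
    | some s =>
      if (cell.length : Int) = maxv ∧ s ≤ sep then (maxv, some s, idx)
      else ((cell.length : Int), some sep, i, j)
    | none => ((cell.length : Int), some sep, i, j)
  else (maxv, sepBest, idx)

def find_best_solution_py (matrix : List (List (List (Int × Int)))) : List (Int × Int) :=
  let st := (PySem.List.enumerate matrix).foldl
    (fun st ir =>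
      (PySem.List.enumerate ir.2).foldl (fun st jc => pvStepA st ir.1 jc.1 jc.2) st)
    ((0 : Int), (none : Option Int), (0 : Int), (0 : Int))
  (PySem.List.pyGet? ((PySem.List.pyGet? matrix st.2.2.1).getD []) st.2.2.2).getD []

-- ===== PORT B =====

-- (cell[-1][0] - cell[0][0]) + (cell[-1][1] - cell[0][1]), 0 for the empty cell
def pvSepAlt : List (Int × Int) → Int
  | [] => 0
  | c :: rest =>
    let l := List.getLastD rest c
    (l.1 - c.1) + (l.2 - c.2)

-- one iteration of B's loop body: keep the cell with the lexicographically least key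
def pvStepB (st : Option ((Int × Int) × List (Int × Int))) (cell : List (Int × Int)) :
    Option ((Int × Int) × List (Int × Int)) :=
  let key : Int × Int := (-(cell.length : Int), pvSepAlt cell)
  match st with
  | none => some (key, cell)
  | some (bk, bc) =>
    if key.1 < bk.1 ∨ (key.1 = bk.1 ∧ key.2 < bk.2) then some (key, cell)
    else some (bk, bc)

def find_best_solution_py_alt (matrix : List (List (List (Int × Int)))) : List (Int × Int) :=
  match matrix.foldl (fun st row => row.foldl pvStepB st) none with
  | some (_, cell) => cell
  | none => []

-- ===== PRECONDITION & SPEC =====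
-- Pre_ excludes matrices with no cell at all (every row empty, incl. the empty matrix),
-- on which A raises IndexError at the final matrix[0][0] lookup.
def Pre_find_best_solution_py (matrix : List (List (List (Int × Int)))) : Prop :=
  ∃ row ∈ matrix, row ≠ []
instance (matrix : List (List (List (Int × Int)))) : Decidable (Pre_find_best_solution_py matrix) := by
  unfold Pre_find_best_solution_py; infer_instance

def pvWitness_find_best_solution_py : (List (List (List (Int × Int)))) := [[[(0, 1)]]]

def Spec_find_best_solution_py (matrix : List (List (List (Int × Int)))) (out : List (Int × Int)) : Prop := out = find_best_solution_py_alt matrix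
instance (matrix : List (List (List (Int × Int)))) (out : List (Int × Int)) : Decidable (Spec_find_best_solution_py matrix out) := by unfold Spec_find_best_solution_py; infer_instance

-- ===== CLAIM (what is proved, stated in full; the proofs are below) =====
def Claim_equal_find_best_solution_py : Prop := ∀ (matrix : List (List (List (Int × Int)))), Dom_find_best_solution_py matrix → Pre_find_best_solution_py matrix → Spec_find_best_solution_py matrix (find_best_solution_py matrix)

-- ===== LEMMAS AND PROOFS =====

-- telescoping: the sum of consecutive differences is last - first
theorem pvSepSum_cons_cons (a b : Int) (l : List Int) :
    pvSepSum (a :: b :: l) = (b - a) + pvSepSum (b :: l) := by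
  simp [pvSepSum]

theorem pvSepSum_telescope (a : Int) (l : List Int) :
    pvSepSum (a :: l) = List.getLastD l a - a := by
  induction l generalizing a with
  | nil => simp [pvSepSum]
  | cons b l ih =>
    rw [pvSepSum_cons_cons, ih b]
    rw [List.getLastD_cons]
    omega

theorem pvGetLastD_map {α β : Type} (f : α → β) (l : List α) (a : α) :
    List.getLastD (l.map f) (f a) = f (List.getLastD l a) := by
  induction l generalizing a with
  | nil => rfl
  | cons b l ih => rw [List.map_cons, List.getLastD_cons, List.getLastD_cons]; exact ih b

-- the O(1) separatedness equals A's summed one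
theorem calcSep_eq_sepAlt (cell : List (Int × Int)) : pvCalcSep cell = pvSepAlt cell := by
  cases cell with
  | nil => rfl
  | cons c rest =>
    simp only [pvCalcSep, pvSepAlt, List.map_cons]
    rw [pvSepSum_telescope, pvSepSum_telescope, pvGetLastD_map, pvGetLastD_map]

def pvLookup (matrix : List (List (List (Int × Int)))) (i j : Int) :
    Option (List (Int × Int)) :=
  PySem.List.pyGet? ((PySem.List.pyGet? matrix i).getD []) j

-- the relation maintained between A's and B's loop states
def pvInv (matrix : List (List (List (Int × Int))))
    (sA : Int × Option Int × Int × Int)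
    (sB : Option ((Int × Int) × List (Int × Int))) : Prop :=
  (sA = (0, none, 0, 0) ∧ sB = none) ∨
  (∃ cell, pvLookup matrix sA.2.2.1 sA.2.2.2 = some cell ∧
    sA.1 = (cell.length : Int) ∧ sA.2.1 = some (pvCalcSep cell) ∧
    sB = some (((-(cell.length : Int)), pvSepAlt cell), cell))

theorem pvStep_inv (matrix : List (List (List (Int × Int))))
    (sA : Int × Option Int × Int × Int) (sB : Option ((Int × Int) × List (Int × Int)))
    (i j : Int) (cell : List (Int × Int))
    (hlk : pvLookup matrix i j = some cell)
    (h : pvInv matrix sA sB) :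
    pvInv matrix (pvStepA sA i j cell) (pvStepB sB cell) := by
  rcases h with ⟨hA, hB⟩ | ⟨bcell, hlkb, hlen, hsep, hB⟩
  · subst hA; subst hB
    have h0 : (0 : Int) ≤ (cell.length : Int) := Int.natCast_nonneg _
    simp only [pvInv, pvStepA, pvStepB]
    rw [if_pos h0]
    exact Or.inr ⟨cell, hlk, rfl, rfl, rfl⟩
  · obtain ⟨maxv, sepBest, ib, jb⟩ := sA
    simp only at hlen hsep hlkb
    subst hlen hsep hB
    have hca := calcSep_eq_sepAlt cell
    have hcb := calcSep_eq_sepAlt bcell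
    simp only [pvInv, pvStepA, pvStepB]
    by_cases hge : ((bcell.length : Int)) ≤ (cell.length : Int)
    · rw [if_pos hge]
      by_cases hskip : (cell.length : Int) = (bcell.length : Int) ∧ pvCalcSep bcell ≤ pvCalcSep cell
      · -- A skips; B keeps its best too
        rw [if_pos hskip, if_neg (by omega)]
        exact Or.inr ⟨bcell, hlkb, rfl, rfl, rfl⟩
      · -- A updates; B updates
        rw [if_neg hskip, if_pos (by omega)]
        exact Or.inr ⟨cell, hlk, rfl, rfl, rfl⟩
    · -- A skips (shorter cell); B keeps its best
      rw [if_neg hge, if_neg (by omega)]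
      exact Or.inr ⟨bcell, hlkb, rfl, rfl, rfl⟩

-- inner fold over a row preserves the invariant
theorem pvInner_inv (matrix : List (List (List (Int × Int)))) (i : Int)
    (l : List (Int × List (Int × Int)))
    (hl : ∀ p ∈ l, pvLookup matrix i p.1 = some p.2)
    (sA : Int × Option Int × Int × Int) (sB : Option ((Int × Int) × List (Int × Int)))
    (h : pvInv matrix sA sB) :
    pvInv matrix (l.foldl (fun st jc => pvStepA st i jc.1 jc.2) sA)
      (l.foldl (fun st jc => pvStepB st jc.2) sB) := by
  induction l generalizing sA sB with
  | nil => exact h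
  | cons p l ih =>
    exact ih (fun q hq => hl q (List.mem_cons_of_mem _ hq)) _ _
      (pvStep_inv matrix sA sB i p.1 p.2 (hl p (List.mem_cons_self ..)) h)

theorem pvEnum_get {α : Type} (xs : List α) (s : Nat) (p : Int × α)
    (hp : p ∈ PySem.List.enumerate xs (s : Int)) :
    ∃ k : Nat, p.1 = ((s + k : Nat) : Int) ∧ xs[k]? = some p.2 := by
  induction xs generalizing s with
  | nil => simp [PySem.List.enumerate_nil] at hp
  | cons x xs ih =>
    rw [PySem.List.enumerate_cons] at hp
    rcases List.mem_cons.mp hp with h | h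
    · exact ⟨0, by simp [h], by simp [h]⟩
    · have hcast : ((s : Int) + 1) = (((s + 1 : Nat)) : Int) := by push_cast; ring
      rw [hcast] at h
      obtain ⟨k, hk1, hk2⟩ := ih (s + 1) h
      refine ⟨k + 1, by push_cast at hk1 ⊢; omega, by simpa using hk2⟩

theorem pvEnum_lookup {α : Type} (xs : List α) (p : Int × α)
    (hp : p ∈ PySem.List.enumerate xs 0) :
    PySem.List.pyGet? xs p.1 = some p.2 := by
  obtain ⟨k, h1, h2⟩ := pvEnum_get xs 0 p (by exact_mod_cast hp)
  rw [h1, PySem.List.pyGet?_natCast]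
  simpa using h2

-- B's step always yields some; a fold of B's step over a nonempty-or-started list is some
theorem pvStepB_isSome (st : Option ((Int × Int) × List (Int × Int))) (cell : List (Int × Int)) :
    (pvStepB st cell).isSome := by
  cases st with
  | none => rfl
  | some p => obtain ⟨bk, bc⟩ := p; simp only [pvStepB]; split <;> rfl

theorem pvFoldB_isSome (l : List (List (Int × Int)))
    (st : Option ((Int × Int) × List (Int × Int)))
    (h : st.isSome ∨ l ≠ []) : (l.foldl pvStepB st).isSome := by
  induction l generalizing st with
  | nil => simpa using h.resolve_right (by simp)
  | cons x l ih =>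
    exact ih (pvStepB st x) (Or.inl (pvStepB_isSome st x))

theorem pvFoldB_rows_isSome (rows : List (List (List (Int × Int))))
    (st : Option ((Int × Int) × List (Int × Int)))
    (h : st.isSome ∨ ∃ row ∈ rows, row ≠ []) :
    (rows.foldl (fun st row => row.foldl pvStepB st) st).isSome := by
  induction rows generalizing st with
  | nil =>
    rcases h with h | ⟨row, hmem, _⟩
    · simpa using h
    · simp at hmem
  | cons r rows ih =>
    rcases h with h | ⟨row, hmem, hne⟩
    · exact ih _ (Or.inl (pvFoldB_isSome r st (Or.inl h)))
    · rcases List.mem_cons.mp hmem with rfl | hmem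
      · exact ih _ (Or.inl (pvFoldB_isSome row st (Or.inr hne)))
      · by_cases hr : (r.foldl pvStepB st).isSome
        · exact ih _ (Or.inl hr)
        · exact ih _ (Or.inr ⟨row, hmem, hne⟩)

-- B's inner fold over an enumerated row equals the fold over the row itself
theorem pvFoldB_enum (row : List (List (Int × Int))) (s : Int)
    (st : Option ((Int × Int) × List (Int × Int))) :
    (PySem.List.enumerate row s).foldl (fun st jc => pvStepB st jc.2) st
      = row.foldl pvStepB st := by
  induction row generalizing s st with
  | nil => rfl
  | cons x xs ih => rw [PySem.List.enumerate_cons]; simp only [List.foldl_cons]; exact ih _ _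

-- outer fold preserves the invariant
theorem pvOuter_inv (matrix : List (List (List (Int × Int))))
    (l : List (Int × List (List (Int × Int))))
    (hl : ∀ p ∈ l, PySem.List.pyGet? matrix p.1 = some p.2)
    (sA : Int × Option Int × Int × Int) (sB : Option ((Int × Int) × List (Int × Int)))
    (h : pvInv matrix sA sB) :
    pvInv matrix
      (l.foldl (fun st ir => (PySem.List.enumerate ir.2).foldl (fun st jc => pvStepA st ir.1 jc.1 jc.2) st) sA)
      (l.foldl (fun st ir => ir.2.foldl pvStepB st) sB) := by
  induction l generalizing sA sB with
  | nil => exact h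
  | cons p l ih =>
    refine ih (fun q hq => hl q (List.mem_cons_of_mem _ hq)) _ _ ?_
    show pvInv matrix
      ((PySem.List.enumerate p.2).foldl (fun st jc => pvStepA st p.1 jc.1 jc.2) sA)
      (p.2.foldl pvStepB sB)
    rw [← pvFoldB_enum p.2 0]
    refine pvInner_inv matrix p.1 (PySem.List.enumerate p.2 0) ?_ sA sB h
    intro q hq
    have hrow := hl p (List.mem_cons_self ..)
    have := pvEnum_lookup p.2 q hq
    simpa [pvLookup, hrow] using this

-- fold over the enumerated rows, ignoring the indices, equals the fold over the rows
theorem pvFoldB_enum_rows (rows : List (List (List (Int × Int)))) (s : Int)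
    (st : Option ((Int × Int) × List (Int × Int))) :
    (PySem.List.enumerate rows s).foldl (fun st ir => ir.2.foldl pvStepB st) st
      = rows.foldl (fun st row => row.foldl pvStepB st) st := by
  induction rows generalizing s st with
  | nil => rfl
  | cons r rows ih => rw [PySem.List.enumerate_cons]; simp only [List.foldl_cons]; exact ih _ _

-- ===== VERDICT (by name: the statement is the Claim_ definition above) =====
theorem find_best_solution_py_spec : Claim_equal_find_best_solution_py := by
  intro matrix _ hpre
  unfold Spec_find_best_solution_py find_best_solution_py find_best_solution_py_alt
  have hinv := pvOuter_inv matrix (PySem.List.enumerate matrix 0)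
    (fun p hp => pvEnum_lookup matrix p hp)
    ((0 : Int), (none : Option Int), (0 : Int), (0 : Int)) none (Or.inl ⟨rfl, rfl⟩)
  rw [pvFoldB_enum_rows matrix 0 none] at hinv
  have hsome := pvFoldB_rows_isSome matrix none (Or.inr hpre)
  rcases hinv with ⟨_, hB⟩ | ⟨cell, hlk, _, _, hB⟩
  · rw [hB] at hsome; simp at hsome
  · rw [hB]
    simp only [pvLookup] at hlk
    simp [hlk]
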